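-- pv_equiv track=rewrite | github.com/lkboyles/advent | code/01/part_1.py | current_floor
-- ===== SOURCE A (Python) =====
-- def current_floor(instructions):
--     """Yield the current floor based on the instructions
--
--     >>> list(current_floor("((("))
--     [1, 2, 3]
--     >>> list(current_floor("())(()"))
--     [1, 0, -1, 0, 1, 0]
--     >>> list(current_floor(""))
--     []
--
--     """
--     floor = 0
--     for instruction in instructions:
--         if instruction == '(':
--             floor += 1
--         if instruction == ')':
--             floor -= 1
--         yield floor
-- ===== SOURCE B (Python) =====
-- def current_floor(instructions):
--     """Yield the current floor after each instruction.
--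
--     Instead of maintaining a running accumulator, compute each yielded
--     value independently as a balance of the prefix ending there:
--     floor after position i = (number of '(' in instructions[:i+1])
--                            - (number of ')' in instructions[:i+1]).
--     """
--     for end in range(1, len(instructions) + 1):
--         prefix = instructions[:end]
--         yield prefix.count('(') - prefix.count(')')
-- ===== Notes on version B (the rewrite author's own statement) =====
-- stated objective: alternative
-- what changed: Replaces the stateful accumulator loop by a stateless per-position computation: for every prefix length it slices the prefix and yields its parenthesis balance via two str.count calls, trading O(n) for O(n^2) but removing all mutable loop state.
import Mathlib
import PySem

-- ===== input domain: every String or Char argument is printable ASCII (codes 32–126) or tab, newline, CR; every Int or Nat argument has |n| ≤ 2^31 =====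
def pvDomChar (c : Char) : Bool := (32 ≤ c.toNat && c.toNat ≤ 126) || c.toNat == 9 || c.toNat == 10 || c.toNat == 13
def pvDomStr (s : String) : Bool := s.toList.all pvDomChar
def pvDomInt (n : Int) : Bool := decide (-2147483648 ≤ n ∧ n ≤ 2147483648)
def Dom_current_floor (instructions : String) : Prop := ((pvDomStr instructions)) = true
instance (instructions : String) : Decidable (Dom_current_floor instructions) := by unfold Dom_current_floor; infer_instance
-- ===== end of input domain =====

-- B replaces A's stateful accumulator loop by a stateless per-position computation:
-- each yielded value is recomputed as the parenthesis balance of the prefix ending there.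

-- ===== PORT A =====
-- A's generator, collected to a list: state is the current floor; each step
-- applies the two independent ifs and yields the floor.
def currentFloorGo (floor : Int) : List Char → List Int
  | [] => []
  | c :: rest =>
      let floor1 := if c = '(' then floor + 1 else floor
      let floor2 := if c = ')' then floor1 - 1 else floor1
      floor2 :: currentFloorGo floor2 rest

def current_floor (instructions : String) : List Int :=
  currentFloorGo 0 instructions.toList

-- ===== PORT B =====
-- for end in range(1, len+1): prefix = instructions[:end]; yield prefix.count('(') - prefix.count(')')
-- (str.count of a single character equals the character count of the list — exact here)
def current_floor_alt (instructions : String) : List Int :=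
  (PySem.List.pyRange 1 (instructions.toList.length + 1) 1).map (fun i =>
    let pfx := PySem.List.slice instructions.toList none (some i)
    (pfx.count '(' : Int) - (pfx.count ')' : Int))

-- ===== PRECONDITION & SPEC =====
def Spec_current_floor (instructions : String) (out : List Int) : Prop := out = current_floor_alt instructions
instance (instructions : String) (out : List Int) : Decidable (Spec_current_floor instructions out) := by unfold Spec_current_floor; infer_instance

-- ===== CLAIM (what is proved, stated in full; the proofs are below) =====
def Claim_equal_current_floor : Prop := ∀ (instructions : String), Dom_current_floor instructions → Spec_current_floor instructions (current_floor instructions)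

-- ===== LEMMAS AND PROOFS =====

-- A's running floor after k+1 steps is s plus the balance of the (k+1)-prefix.
theorem currentFloorGo_eq_balance (l : List Char) (s : Int) :
    currentFloorGo s l = (List.range l.length).map (fun k =>
      s + (((l.take (k+1)).count '(' : Int) - ((l.take (k+1)).count ')' : Int))) := by
  induction l generalizing s with
  | nil => rfl
  | cons c t ih =>
      simp only [currentFloorGo, List.length_cons, List.range_succ_eq_map, List.map_cons,
        List.map_map, ih]
      refine List.cons_eq_cons.mpr ⟨?_, ?_⟩
      · simp only [List.take, List.count_cons, List.count_nil]
        by_cases h1 : c = '(' <;> by_cases h2 : c = ')' <;> simp [h1, h2]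
        all_goals omega
      · apply List.map_congr_left
        intro k _
        simp only [Function.comp_apply, List.take_succ_cons, List.count_cons]
        by_cases h1 : c = '(' <;> by_cases h2 : c = ')' <;> simp [h1, h2]
        all_goals ring

-- ===== VERDICT (by name: the statement is the Claim_ definition above) =====
theorem current_floor_spec : Claim_equal_current_floor := by
  intro s _
  unfold Spec_current_floor current_floor current_floor_alt
  rw [currentFloorGo_eq_balance, PySem.List.pyRange_one]
  rw [show (((s.toList.length : Int) + 1 - 1).toNat) = s.toList.length by omega, List.map_map]
  apply List.map_congr_left
  intro k hk
  simp only [Function.comp_apply]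
  rw [show (1 : Int) + (k : Int) = ((k + 1 : Nat) : Int) by push_cast; ring,
      PySem.List.slice_to_natCast]
  simp
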